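-- pv_equiv track=rewrite | github.com/wa3l/TweetSearch | engn.py | bigrams
-- ===== SOURCE A (Python) =====
-- def bigrams(term, pos):
--   """Generate bigrams for wildcard subset"""
--   k = 2
--   bigrams = []
--   if pos == 'start': bigrams.append("$" + term[0:k-1])
--   i = 0
--   while i < len(term) - (k - 1):
--     bigrams.append(term[i:i+k])
--     i += 1
--   if pos == 'end': bigrams.append(term[-(k-1):] + "$")
--   return [t for t in bigrams if len(t) == k]
-- ===== SOURCE B (Python) =====
-- def bigrams(term, pos):
--   """Generate bigrams for wildcard subset"""
--   padded = "$" + term if pos == 'start' else term + "$" if pos == 'end' else term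
--   return [padded[i:i+2] for i in range(len(padded) - 1)]
-- ===== Notes on version B (the rewrite author's own statement) =====
-- stated objective: simpler
-- what changed: B pre-pads the term with the '$' marker according to pos and emits all adjacent length-2 windows in one uniform list comprehension, replacing A's separate marker-append branches, explicit while-loop with repeated appends, and final length filter.
import Mathlib
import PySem

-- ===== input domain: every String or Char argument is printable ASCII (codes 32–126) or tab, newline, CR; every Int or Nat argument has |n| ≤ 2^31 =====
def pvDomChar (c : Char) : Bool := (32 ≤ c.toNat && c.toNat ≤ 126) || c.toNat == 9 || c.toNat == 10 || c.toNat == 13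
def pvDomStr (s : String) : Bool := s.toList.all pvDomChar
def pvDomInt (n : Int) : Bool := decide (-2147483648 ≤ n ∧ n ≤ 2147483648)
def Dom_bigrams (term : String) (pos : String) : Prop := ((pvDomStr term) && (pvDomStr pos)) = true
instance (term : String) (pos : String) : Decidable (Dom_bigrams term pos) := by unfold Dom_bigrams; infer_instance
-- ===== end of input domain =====

-- B builds the padded string up front and slides one uniform window, replacing A's
-- marker branches plus final length filter; objective: simpler, same output.

-- ===== PORT A =====
-- literal transliteration of A: optional start marker, while-loop over i, optional
-- end marker, final filter keeping only length-2 entries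
def bigrams (term : String) (pos : String) : List String :=
  let t : List Char := term.toList
  let bs0 : List (List Char) :=
    if pos = "start" then [['$'] ++ PySem.List.slice t (some 0) (some (2 - 1))] else []
  let bs1 : List (List Char) :=
    (PySem.List.pyRange 0 (PySem.List.len t - (2 - 1)) 1).foldl
      (fun acc i => acc ++ [PySem.List.slice t (some i) (some (i + 2))]) bs0
  let bs2 : List (List Char) :=
    if pos = "end" then bs1 ++ [PySem.List.slice t (some (-(2 - 1))) none ++ ['$']] else bs1
  (bs2.filter (fun u => u.length == 2)).map (fun u => String.ofList u)

-- ===== PORT B =====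
-- literal transliteration of B: pad, then one sliding-window comprehension
def bigrams_alt (term : String) (pos : String) : List String :=
  let padded : List Char :=
    if pos = "start" then '$' :: term.toList
    else if pos = "end" then term.toList ++ ['$']
    else term.toList
  (PySem.List.pyRange 0 (PySem.List.len padded - 1) 1).map
    (fun i => String.ofList (PySem.List.slice padded (some i) (some (i + 2))))

-- ===== PRECONDITION & SPEC =====
def Spec_bigrams (term : String) (pos : String) (out : List String) : Prop := out = bigrams_alt term pos
instance (term : String) (pos : String) (out : List String) : Decidable (Spec_bigrams term pos out) := by unfold Spec_bigrams; infer_instance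

-- ===== CLAIM (what is proved, stated in full; the proofs are below) =====
def Claim_equal_bigrams : Prop := ∀ (term : String) (pos : String), Dom_bigrams term pos → Spec_bigrams term pos (bigrams term pos)

-- ===== LEMMAS AND PROOFS =====

/-- The adjacent-pairs function both programs compute in the middle. -/
def pvPairs : List Char → List (List Char)
  | a :: b :: r => [a, b] :: pvPairs (b :: r)
  | _ => []

theorem pvPairs_len {l : List Char} {u : List Char} (h : u ∈ pvPairs l) : u.length = 2 := by
  induction l with
  | nil => simp [pvPairs] at h
  | cons a r ih =>
    cases r with
    | nil => simp [pvPairs] at h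
    | cons b r' =>
      simp only [pvPairs, List.mem_cons] at h
      rcases h with h | h
      · subst h; rfl
      · exact ih h

theorem pvPairs_append (l : List Char) (h : l ≠ []) (c : Char) :
    pvPairs (l ++ [c]) = pvPairs l ++ [[l.getLast h, c]] := by
  induction l with
  | nil => exact absurd rfl h
  | cons x r ih =>
    cases r with
    | nil => rfl
    | cons y r' =>
      simp only [List.cons_append, pvPairs]
      rw [show y :: (r' ++ [c]) = (y :: r') ++ [c] from rfl, ih (by simp)]
      simp [List.getLast]

/-- windows as a map over `range` equal the pairs function. -/
theorem pv_windows_eq_pairs (l : List Char) :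
    (List.range (l.length - 1)).map (fun j => (l.drop j).take 2) = pvPairs l := by
  induction l with
  | nil => rfl
  | cons a r ih =>
    cases r with
    | nil => rfl
    | cons b r' =>
      have hlen : (a :: b :: r').length - 1 = (b :: r').length - 1 + 1 := by
        simp
      rw [hlen, List.range_succ_eq_map, List.map_cons, List.map_map]
      refine congrArg₂ List.cons rfl ?_
      rw [← ih]
      rfl

/-- The uniform window pass of both ports equals `pvPairs`. -/
theorem pv_win_map (l : List Char) :
    (PySem.List.pyRange 0 (PySem.List.len l - 1) 1).map
      (fun i => PySem.List.slice l (some i) (some (i + 2))) = pvPairs l := by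
  cases l with
  | nil => decide
  | cons a r =>
    have h1 : PySem.List.len (a :: r) - 1 = (((a :: r).length - 1 : Nat) : Int) := by
      simp [PySem.List.len_eq]
    rw [h1, PySem.List.pyRange_zero_natCast, List.map_map]
    rw [← pv_windows_eq_pairs (a :: r)]
    refine List.map_congr_left ?_
    intro j hj
    simp only [Function.comp]
    have h2 : ((j : Int) + 2) = ((j + 2 : Nat) : Int) := by push_cast; ring
    rw [h2, PySem.List.slice_natCast]
    congr 1
    omega

theorem pv_winA (l : List Char) (init : List (List Char)) :
    (PySem.List.pyRange 0 (PySem.List.len l - 1) 1).foldl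
      (fun acc i => acc ++ [PySem.List.slice l (some i) (some (i + 2))]) init
      = init ++ pvPairs l := by
  rw [PySem.List.foldl_append_singleton_eq_map, pv_win_map]

theorem pv_filter_pairs (l : List Char) :
    (pvPairs l).filter (fun u => u.length == 2) = pvPairs l := by
  apply List.filter_eq_self.mpr
  intro u hu
  simp [pvPairs_len hu]

theorem pv_win_map' (l : List Char) :
    (PySem.List.pyRange 0 (PySem.List.len l - 1) 1).map
      (fun i => String.ofList (PySem.List.slice l (some i) (some (i + 2))))
      = (pvPairs l).map (fun u => String.ofList u) := by
  rw [← pv_win_map l, List.map_map]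
  rfl

theorem pv_drop_last (a : Char) (r : List Char) :
    (a :: r).drop ((a :: r).length - 1) = [(a :: r).getLast (by simp)] := by
  induction r generalizing a with
  | nil => rfl
  | cons b r' ih =>
    have := ih b
    simpa using this

-- ===== VERDICT (by name: the statement is the Claim_ definition above) =====
theorem bigrams_spec : Claim_equal_bigrams := by
  intro term pos _
  show bigrams term pos = bigrams_alt term pos
  unfold bigrams bigrams_alt
  have h21 : ((2 : Int) - 1) = 1 := by decide
  cases hterm : term.toList with
  | nil =>
    by_cases hs : pos = "start"
    · subst hs; decide
    · by_cases he : pos = "end"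
      · subst he; decide
      · simp only [if_neg hs, if_neg he, h21]
        rw [pv_winA]
        simp [pvPairs]
  | cons a r =>
    by_cases hs : pos = "start"
    · subst hs
      simp only [reduceIte, h21]
      rw [pv_winA, pv_win_map']
      have hsl : PySem.List.slice (a :: r) (some 0) (some 1) = [a] := by
        simp [PySem.List.slice]
      rw [hsl, if_neg (show ¬ ("start" : String) = "end" from by decide)]
      rw [show ([['$'] ++ [a]] : List (List Char)) ++ pvPairs (a :: r)
            = ['$', a] :: pvPairs (a :: r) from rfl]
      rw [List.filter_cons_of_pos (by simp), pv_filter_pairs]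
      rfl
    · by_cases he : pos = "end"
      · subst he
        simp only [h21, if_neg hs]
        rw [pv_winA, pv_win_map']
        have hsl : PySem.List.slice (a :: r) (some (-1)) none = [(a :: r).getLast (by simp)] := by
          rw [PySem.List.slice_from_neg_one]
          exact pv_drop_last a r
        have hp := pvPairs_append (a :: r) (by simp) '$'
        rw [List.cons_append] at hp
        simp [hsl, hp, List.filter_append, pv_filter_pairs]
      · simp only [if_neg hs, if_neg he, h21]
        rw [pv_winA, pv_win_map', List.nil_append, pv_filter_pairs]
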